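-- pv_equiv track=rewrite | github.com/klauseduard/estonian-scrabble | game/word_validator.py | _are_turn_tiles_connected
-- ===== SOURCE A (Python) =====
-- from typing import List, Tuple, Set, Dict, Optional
--
-- def _are_turn_tiles_connected(board: List[List[Optional[str]]], current_turn_tiles: Set[Tuple[int, int]]) -> bool:
--     """Check if all tiles placed in current turn form a continuous line."""
--     if not current_turn_tiles:
--         return True
--     if len(current_turn_tiles) == 1:
--         return True
--
--     # Find if tiles form a line (horizontal or vertical)
--     tiles = list(current_turn_tiles)
--     rows = [r for r, _ in tiles]
--     cols = [c for _, c in tiles]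
--
--     # Check if tiles are in same row
--     if len(set(rows)) == 1:
--         # All tiles in same row - check if continuous
--         cols = sorted(cols)
--         # Check each position between min and max col has either a current turn tile or existing tile
--         return all((rows[0], col) in current_turn_tiles or
--                   (board[rows[0]][col] is not None and (rows[0], col) not in current_turn_tiles)
--                   for col in range(cols[0], cols[-1] + 1))
--
--     # Check if tiles are in same column
--     if len(set(cols)) == 1:
--         # All tiles in same column - check if continuous
--         rows = sorted(rows)
--         # Check each position between min and max row has either a current turn tile or existing tile
--         return all((row, cols[0]) in current_turn_tiles or
--                   (board[row][cols[0]] is not None and (row, cols[0]) not in current_turn_tiles)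
--                   for row in range(rows[0], rows[-1] + 1))
--
--     # Tiles neither in same row nor column
--     return False
-- ===== SOURCE B (Python) =====
-- def _are_turn_tiles_connected(board, current_turn_tiles):
--     """Check if all tiles placed in current turn form a continuous line.
--
--     Gap-walk: sort the placed coordinates along the moving axis and verify
--     every board cell strictly between consecutive placed tiles is occupied.
--     """
--     if len(current_turn_tiles) <= 1:
--         return True
--     rows = sorted({r for r, _ in current_turn_tiles})
--     cols = sorted({c for _, c in current_turn_tiles})
--     if len(rows) == 1:
--         r = rows[0]
--         for a, b in zip(cols, cols[1:]):
--             for c in range(a + 1, b):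
--                 if board[r][c] is None:
--                     return False
--         return True
--     if len(cols) == 1:
--         c = cols[0]
--         for a, b in zip(rows, rows[1:]):
--             for r in range(a + 1, b):
--                 if board[r][c] is None:
--                     return False
--         return True
--     return False
-- ===== Notes on version B (the rewrite author's own statement) =====
-- stated objective: alternative
-- what changed: A scans every cell of the min..max span testing set membership at each position; B sorts the distinct placed coordinates along the moving axis and walks only the gaps between consecutive placed tiles, checking that each in-between board cell is occupied.
-- outside the precondition, e.g. on _are_turn_tiles_connected([[None, None]], {(0, 3), (0, 0)}): A returns False, B returns False
import Mathlib
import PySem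

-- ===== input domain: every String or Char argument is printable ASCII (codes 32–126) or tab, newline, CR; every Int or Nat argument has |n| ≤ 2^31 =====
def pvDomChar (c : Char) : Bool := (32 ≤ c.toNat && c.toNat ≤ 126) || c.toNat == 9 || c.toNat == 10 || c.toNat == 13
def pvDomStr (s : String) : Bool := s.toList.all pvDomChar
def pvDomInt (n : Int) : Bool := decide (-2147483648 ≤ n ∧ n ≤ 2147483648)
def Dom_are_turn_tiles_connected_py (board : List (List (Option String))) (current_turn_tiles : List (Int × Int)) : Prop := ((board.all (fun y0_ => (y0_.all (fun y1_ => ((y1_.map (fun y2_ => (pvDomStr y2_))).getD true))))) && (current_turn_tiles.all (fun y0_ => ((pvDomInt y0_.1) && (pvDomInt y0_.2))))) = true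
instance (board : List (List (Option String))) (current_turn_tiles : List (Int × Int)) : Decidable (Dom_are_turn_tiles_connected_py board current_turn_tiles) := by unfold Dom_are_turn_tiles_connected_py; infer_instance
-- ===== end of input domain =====

-- B replaces A's flat min..max span scan (membership test at every cell) by sorting the
-- distinct placed coordinates and walking only the gaps between consecutive placed tiles
-- (objective: alternative decomposition, same asymptotic cost).

-- `board[r][c] is not None` with Python index semantics; `none` (= IndexError) is mapped
-- to `false` here — Pre_ excludes the inputs where the Pythons would raise.
def pvCellNotNone (board : List (List (Option String))) (r c : Int) : Bool :=
  match PySem.List.pyGet? board r with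
  | some row =>
    match PySem.List.pyGet? row c with
    | some (some _) => true
    | _ => false
  | none => false

-- ===== PORT A =====
def are_turn_tiles_connected_py (board : List (List (Option String))) (current_turn_tiles : List (Int × Int)) : Bool :=
  if current_turn_tiles.isEmpty then true
  else if current_turn_tiles.length == 1 then true
  else
    if (PySem.Set.ofList (current_turn_tiles.map Prod.fst)).length == 1 then
      (PySem.List.pyRange
          (PySem.List.pyGetD (PySem.List.sorted (current_turn_tiles.map Prod.snd) (fun x => x) false) 0 0)
          (PySem.List.pyGetD (PySem.List.sorted (current_turn_tiles.map Prod.snd) (fun x => x) false) (-1) 0 + 1) 1).all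
        (fun col =>
          decide ((PySem.List.pyGetD (current_turn_tiles.map Prod.fst) 0 0, col) ∈ current_turn_tiles) ||
          (pvCellNotNone board (PySem.List.pyGetD (current_turn_tiles.map Prod.fst) 0 0) col &&
           !decide ((PySem.List.pyGetD (current_turn_tiles.map Prod.fst) 0 0, col) ∈ current_turn_tiles)))
    else if (PySem.Set.ofList (current_turn_tiles.map Prod.snd)).length == 1 then
      (PySem.List.pyRange
          (PySem.List.pyGetD (PySem.List.sorted (current_turn_tiles.map Prod.fst) (fun x => x) false) 0 0)
          (PySem.List.pyGetD (PySem.List.sorted (current_turn_tiles.map Prod.fst) (fun x => x) false) (-1) 0 + 1) 1).all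
        (fun row =>
          decide ((row, PySem.List.pyGetD (current_turn_tiles.map Prod.snd) 0 0) ∈ current_turn_tiles) ||
          (pvCellNotNone board row (PySem.List.pyGetD (current_turn_tiles.map Prod.snd) 0 0) &&
           !decide ((row, PySem.List.pyGetD (current_turn_tiles.map Prod.snd) 0 0) ∈ current_turn_tiles)))
    else false

-- ===== PORT B =====
-- walk consecutive pairs of the sorted placed coordinates; every cell strictly between
-- a pair must hold an existing tile
def pvGapWalk (occ : Int → Bool) : List Int → Bool
  | a :: b :: rest => (PySem.List.pyRange (a + 1) b 1).all occ && pvGapWalk occ (b :: rest)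
  | _ => true

def are_turn_tiles_connected_py_alt (board : List (List (Option String))) (current_turn_tiles : List (Int × Int)) : Bool :=
  if current_turn_tiles.length ≤ 1 then true
  else
    if (PySem.List.sorted (PySem.Set.ofList (current_turn_tiles.map Prod.fst)) (fun x => x) false).length == 1 then
      pvGapWalk
        (fun c => pvCellNotNone board
          (PySem.List.pyGetD (PySem.List.sorted (PySem.Set.ofList (current_turn_tiles.map Prod.fst)) (fun x => x) false) 0 0) c)
        (PySem.List.sorted (PySem.Set.ofList (current_turn_tiles.map Prod.snd)) (fun x => x) false)
    else if (PySem.List.sorted (PySem.Set.ofList (current_turn_tiles.map Prod.snd)) (fun x => x) false).length == 1 then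
      pvGapWalk
        (fun r => pvCellNotNone board r
          (PySem.List.pyGetD (PySem.List.sorted (PySem.Set.ofList (current_turn_tiles.map Prod.snd)) (fun x => x) false) 0 0))
        (PySem.List.sorted (PySem.Set.ofList (current_turn_tiles.map Prod.fst)) (fun x => x) false)
    else false

-- ===== PRECONDITION & SPEC =====
-- `board[r][c]` succeeds (row and column are valid Python indices)
def pvCellInBounds (board : List (List (Option String))) (r c : Int) : Bool :=
  match PySem.List.pyGet? board r with
  | some row => (PySem.List.pyGet? row c).isSome
  | none => false

-- the closed min..max span of a coordinate list
def pvSpan (xs : List Int) : List Int :=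
  PySem.List.pyRange (PySem.List.pyGetD (PySem.List.sorted xs (fun x => x) false) 0 0)
    (PySem.List.pyGetD (PySem.List.sorted xs (fun x => x) false) (-1) 0 + 1) 1

-- Pre_ excludes the inputs whose scanned line contains a cell that is neither a turn tile
-- nor a valid board index: on most of them Python A raises IndexError (and B raises the
-- same way), on the rest A returns False before reaching the bad index (and so does B).
def Pre_are_turn_tiles_connected_py (board : List (List (Option String))) (current_turn_tiles : List (Int × Int)) : Prop :=
  ∀ p0 ∈ current_turn_tiles,
    ((∀ p ∈ current_turn_tiles, p.1 = p0.1) →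
       ∀ c ∈ pvSpan (current_turn_tiles.map Prod.snd),
         (p0.1, c) ∈ current_turn_tiles ∨ pvCellInBounds board p0.1 c = true)
    ∧ ((∀ p ∈ current_turn_tiles, p.2 = p0.2) →
       ∀ r ∈ pvSpan (current_turn_tiles.map Prod.fst),
         (r, p0.2) ∈ current_turn_tiles ∨ pvCellInBounds board r p0.2 = true)
instance (board : List (List (Option String))) (current_turn_tiles : List (Int × Int)) : Decidable (Pre_are_turn_tiles_connected_py board current_turn_tiles) := by unfold Pre_are_turn_tiles_connected_py; infer_instance

def pvWitness_are_turn_tiles_connected_py : List (List (Option String)) × (List (Int × Int)) :=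
  ([[some "A", none, some "B"]], [((0 : Int), (0 : Int)), (0, 2)])

def Spec_are_turn_tiles_connected_py (board : List (List (Option String))) (current_turn_tiles : List (Int × Int)) (out : Bool) : Prop := out = are_turn_tiles_connected_py_alt board current_turn_tiles
instance (board : List (List (Option String))) (current_turn_tiles : List (Int × Int)) (out : Bool) : Decidable (Spec_are_turn_tiles_connected_py board current_turn_tiles out) := by unfold Spec_are_turn_tiles_connected_py; infer_instance

-- ===== CLAIM (what is proved, stated in full; the proofs are below) =====
def Claim_equal_are_turn_tiles_connected_py : Prop := ∀ (board : List (List (Option String))) (current_turn_tiles : List (Int × Int)), Dom_are_turn_tiles_connected_py board current_turn_tiles → Pre_are_turn_tiles_connected_py board current_turn_tiles → Spec_are_turn_tiles_connected_py board current_turn_tiles (are_turn_tiles_connected_py board current_turn_tiles)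

-- ===== LEMMAS AND PROOFS =====

theorem pv_headD_le_of_pairwise {l : List Int} (hp : l.Pairwise (· ≤ ·)) :
    ∀ x ∈ l, l.headD 0 ≤ x := by
  cases l with
  | nil => intro x hx; cases hx
  | cons a t =>
    intro x hx
    rcases List.mem_cons.mp hx with rfl | hx
    · simp
    · simpa using List.rel_of_pairwise_cons hp hx

theorem pv_le_getLastD_of_pairwise {l : List Int} (hp : l.Pairwise (· ≤ ·)) :
    ∀ (d : Int), ∀ x ∈ l, x ≤ l.getLastD d := by
  induction l with
  | nil => intro d x hx; cases hx
  | cons a t ih =>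
    intro d x hx
    rw [List.getLastD_cons]
    cases t with
    | nil =>
      rcases List.mem_cons.mp hx with rfl | hx
      · simp
      · cases hx
    | cons b u =>
      rcases List.mem_cons.mp hx with rfl | hx
      · calc x ≤ b := List.rel_of_pairwise_cons hp (by simp)
          _ ≤ (b :: u).getLastD x := ih hp.of_cons x b (by simp)
      · exact ih hp.of_cons a x hx

theorem pv_headD_mem {l : List Int} (h : l ≠ []) : l.headD 0 ∈ l := by
  cases l with
  | nil => exact absurd rfl h
  | cons a t => simp

theorem pv_getLastD_mem (a : Int) (t : List Int) : ∀ d : Int, (a :: t).getLastD d ∈ a :: t := by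
  induction t generalizing a with
  | nil => intro d; simp
  | cons b u ih =>
    intro d
    rw [List.getLastD_cons]
    exact List.mem_cons_of_mem a (ih b a)

theorem pv_sorted_ne_nil (xs : List Int) (hne : xs ≠ []) :
    PySem.List.sorted xs (fun x => x) false ≠ [] := by
  intro h
  exact hne ((PySem.List.sorted_eq_nil_iff xs (fun x => x) false).mp h)

theorem pv_ofList_ne_nil (xs : List Int) (hne : xs ≠ []) :
    PySem.Set.ofList xs ≠ [] := by
  cases xs with
  | nil => exact absurd rfl hne
  | cons a t =>
    intro h
    have ha : a ∈ PySem.Set.ofList (a :: t) := (PySem.Set.mem_ofList _ _).mpr (by simp)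
    rw [h] at ha
    cases ha

theorem pv_getLastD_eq_pyGetD (xs : List Int) (hne : xs ≠ []) :
    xs.getLastD 0 = PySem.List.pyGetD xs (-1) 0 := by
  cases xs with
  | nil => exact absurd rfl hne
  | cons a t =>
    rw [PySem.List.pyGetD_neg_one (a :: t) 0 (by simp), List.getLast_eq_getLastD, List.getLastD_cons]

theorem pv_headD_eq_pyGetD (xs : List Int) (hne : xs ≠ []) :
    xs.headD 0 = PySem.List.pyGetD xs 0 0 := by
  cases xs with
  | nil => exact absurd rfl hne
  | cons a t => rw [PySem.List.pyGetD_zero_cons]; rfl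

theorem pv_head_sorted_set (xs : List Int) (hne : xs ≠ []) :
    (PySem.List.sorted (PySem.Set.ofList xs) (fun x => x) false).headD 0
      = PySem.List.pyGetD (PySem.List.sorted xs (fun x => x) false) 0 0 := by
  have h1ne : PySem.List.sorted (PySem.Set.ofList xs) (fun x => x) false ≠ [] :=
    pv_sorted_ne_nil _ (pv_ofList_ne_nil xs hne)
  have h2ne : PySem.List.sorted xs (fun x => x) false ≠ [] := pv_sorted_ne_nil xs hne
  have hp1 : (PySem.List.sorted (PySem.Set.ofList xs) (fun x => x) false).Pairwise (· ≤ ·) :=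
    (PySem.List.sorted_ofList_pairwise_lt xs).imp le_of_lt
  have hp2 : (PySem.List.sorted xs (fun x => x) false).Pairwise (· ≤ ·) :=
    PySem.List.sorted_pairwise xs (fun x => x)
  have hm1 : (PySem.List.sorted (PySem.Set.ofList xs) (fun x => x) false).headD 0 ∈ xs := by
    have := pv_headD_mem h1ne
    rw [PySem.List.mem_sorted, PySem.Set.mem_ofList] at this
    exact this
  have hm2 : (PySem.List.sorted xs (fun x => x) false).headD 0 ∈ xs := by
    have := pv_headD_mem h2ne
    rwa [PySem.List.mem_sorted] at this
  have le1 : (PySem.List.sorted (PySem.Set.ofList xs) (fun x => x) false).headD 0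
      ≤ (PySem.List.sorted xs (fun x => x) false).headD 0 := by
    apply pv_headD_le_of_pairwise hp1
    rw [PySem.List.mem_sorted, PySem.Set.mem_ofList]
    exact hm2
  have le2 : (PySem.List.sorted xs (fun x => x) false).headD 0
      ≤ (PySem.List.sorted (PySem.Set.ofList xs) (fun x => x) false).headD 0 := by
    apply pv_headD_le_of_pairwise hp2
    rw [PySem.List.mem_sorted]
    exact hm1
  rw [← pv_headD_eq_pyGetD _ h2ne]
  omega

theorem pv_last_sorted_set (xs : List Int) (hne : xs ≠ []) :
    (PySem.List.sorted (PySem.Set.ofList xs) (fun x => x) false).getLastD 0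
      = PySem.List.pyGetD (PySem.List.sorted xs (fun x => x) false) (-1) 0 := by
  have h1ne : PySem.List.sorted (PySem.Set.ofList xs) (fun x => x) false ≠ [] :=
    pv_sorted_ne_nil _ (pv_ofList_ne_nil xs hne)
  have h2ne : PySem.List.sorted xs (fun x => x) false ≠ [] := pv_sorted_ne_nil xs hne
  have hp1 : (PySem.List.sorted (PySem.Set.ofList xs) (fun x => x) false).Pairwise (· ≤ ·) :=
    (PySem.List.sorted_ofList_pairwise_lt xs).imp le_of_lt
  have hp2 : (PySem.List.sorted xs (fun x => x) false).Pairwise (· ≤ ·) :=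
    PySem.List.sorted_pairwise xs (fun x => x)
  have hlm : ∀ (l : List Int), l ≠ [] → l.getLastD 0 ∈ l := by
    intro l hl
    cases l with
    | nil => exact absurd rfl hl
    | cons a t => exact pv_getLastD_mem a t 0
  have hm1 : (PySem.List.sorted (PySem.Set.ofList xs) (fun x => x) false).getLastD 0 ∈ xs := by
    have := hlm _ h1ne
    rw [PySem.List.mem_sorted, PySem.Set.mem_ofList] at this
    exact this
  have hm2 : (PySem.List.sorted xs (fun x => x) false).getLastD 0 ∈ xs := by
    have := hlm _ h2ne
    rwa [PySem.List.mem_sorted] at this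
  have le1 : (PySem.List.sorted xs (fun x => x) false).getLastD 0
      ≤ (PySem.List.sorted (PySem.Set.ofList xs) (fun x => x) false).getLastD 0 := by
    apply pv_le_getLastD_of_pairwise hp1
    rw [PySem.List.mem_sorted, PySem.Set.mem_ofList]
    exact hm2
  have le2 : (PySem.List.sorted (PySem.Set.ofList xs) (fun x => x) false).getLastD 0
      ≤ (PySem.List.sorted xs (fun x => x) false).getLastD 0 := by
    apply pv_le_getLastD_of_pairwise hp2
    rw [PySem.List.mem_sorted]
    exact hm1
  rw [← pv_getLastD_eq_pyGetD _ h2ne]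
  omega

theorem pv_all_congr_mem {α : Type} {l : List α} {p q : α → Bool}
    (h : ∀ x ∈ l, p x = q x) : l.all p = l.all q := by
  induction l with
  | nil => rfl
  | cons a t ih =>
    rw [List.all_cons, List.all_cons, h a (by simp), ih (fun x hx => h x (by simp [hx]))]

-- core: the flat span scan over a strictly increasing list equals the gap walk
theorem pv_core (occ : Int → Bool) : ∀ (l : List Int),
    l.Pairwise (· < ·) → l ≠ [] →
    (PySem.List.pyRange (l.headD 0) (l.getLastD 0 + 1) 1).all
        (fun c => decide (c ∈ l) || (occ c && !decide (c ∈ l)))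
      = pvGapWalk occ l := by
  intro l
  induction l with
  | nil => intro _ h; exact absurd rfl h
  | cons a t ih =>
    intro hp _
    cases t with
    | nil =>
      rw [show (([a] : List Int)).headD 0 = a from rfl,
          show (([a] : List Int)).getLastD 0 = a from rfl,
          show pvGapWalk occ [a] = true from rfl]
      rw [PySem.List.pyRange_one_singleton]
      simp
    | cons b u =>
      have hab : a < b := List.rel_of_pairwise_cons hp (by simp)
      have hpt : (b :: u).Pairwise (· < ·) := hp.of_cons
      have hptle : (b :: u).Pairwise (· ≤ ·) := hpt.imp le_of_lt
      have hbL : b ≤ (b :: u).getLastD 0 := pv_le_getLastD_of_pairwise hptle 0 b (by simp)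
      have hlast : (a :: b :: u).getLastD 0 = (b :: u).getLastD 0 := by
        simp
      rw [show (a :: b :: u).headD 0 = a from rfl, hlast]
      have hsplit1 : PySem.List.pyRange a ((b :: u).getLastD 0 + 1) 1
          = a :: PySem.List.pyRange (a + 1) ((b :: u).getLastD 0 + 1) 1 := by
        exact PySem.List.pyRange_one_cons (by omega)
      have hsplit2 : PySem.List.pyRange (a + 1) ((b :: u).getLastD 0 + 1) 1
          = PySem.List.pyRange (a + 1) b 1 ++ PySem.List.pyRange b ((b :: u).getLastD 0 + 1) 1 :=
        PySem.List.pyRange_one_append (a + 1) b ((b :: u).getLastD 0 + 1) (by omega) (by omega)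
      rw [hsplit1, hsplit2]
      simp only [List.all_cons, List.all_append]
      have hmema : (decide (a ∈ a :: b :: u) || (occ a && !decide (a ∈ a :: b :: u))) = true := by
        simp
      rw [hmema, Bool.true_and]
      have hgap : (PySem.List.pyRange (a + 1) b 1).all
            (fun c => decide (c ∈ a :: b :: u) || (occ c && !decide (c ∈ a :: b :: u)))
          = (PySem.List.pyRange (a + 1) b 1).all occ := by
        apply pv_all_congr_mem
        intro c hc
        have hc' := PySem.List.mem_pyRange_one.mp hc
        have hnm : c ∉ a :: b :: u := by
          intro hcm
          rcases List.mem_cons.mp hcm with rfl | hcm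
          · omega
          · have : b ≤ c := by simpa using pv_headD_le_of_pairwise hptle c hcm
            omega
        simp [hnm]
      have htail : (PySem.List.pyRange b ((b :: u).getLastD 0 + 1) 1).all
            (fun c => decide (c ∈ a :: b :: u) || (occ c && !decide (c ∈ a :: b :: u)))
          = (PySem.List.pyRange b ((b :: u).getLastD 0 + 1) 1).all
            (fun c => decide (c ∈ b :: u) || (occ c && !decide (c ∈ b :: u))) := by
        apply pv_all_congr_mem
        intro c hc
        have hc' := PySem.List.mem_pyRange_one.mp hc
        have hiff : (c ∈ a :: b :: u) ↔ (c ∈ b :: u) := by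
          constructor
          · intro h
            rcases List.mem_cons.mp h with rfl | h
            · omega
            · exact h
          · exact List.mem_cons_of_mem a
        rw [decide_eq_decide.mpr hiff]
      rw [hgap, htail]
      have hih := ih hpt (by simp)
      simp only [List.headD_cons] at hih
      rw [hih]
      rfl

theorem pv_mem_row {tiles : List (Int × Int)} {e : Int}
    (hall : ∀ pt ∈ tiles, pt.1 = e) :
    ∀ c, ((e, c) ∈ tiles ↔ c ∈ tiles.map Prod.snd) := by
  intro c
  constructor
  · intro h; exact List.mem_map.mpr ⟨(e, c), h, rfl⟩
  · intro h
    obtain ⟨pt, hpt, hc⟩ := List.mem_map.mp h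
    have h1 := hall pt hpt
    have hpe : pt = (e, c) := by
      obtain ⟨x, y⟩ := pt
      simp at h1 hc
      rw [h1, hc]
    rwa [← hpe]

theorem pv_mem_col {tiles : List (Int × Int)} {e : Int}
    (hall : ∀ pt ∈ tiles, pt.2 = e) :
    ∀ r, ((r, e) ∈ tiles ↔ r ∈ tiles.map Prod.fst) := by
  intro r
  constructor
  · intro h; exact List.mem_map.mpr ⟨(r, e), h, rfl⟩
  · intro h
    obtain ⟨pt, hpt, hc⟩ := List.mem_map.mp h
    have h1 := hall pt hpt
    have hpe : pt = (r, e) := by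
      obtain ⟨x, y⟩ := pt
      simp at h1 hc
      rw [h1, hc]
    rwa [← hpe]

theorem pv_branch (tiles : List (Int × Int)) (mk : Int → Int × Int) (occ : Int → Bool)
    (proj : Int × Int → Int)
    (hmem : ∀ c, (mk c ∈ tiles ↔ c ∈ tiles.map proj))
    (hne : tiles ≠ []) :
    (PySem.List.pyRange
        (PySem.List.pyGetD (PySem.List.sorted (tiles.map proj) (fun x => x) false) 0 0)
        (PySem.List.pyGetD (PySem.List.sorted (tiles.map proj) (fun x => x) false) (-1) 0 + 1) 1).all
        (fun c => decide (mk c ∈ tiles) || (occ c && !decide (mk c ∈ tiles)))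
      = pvGapWalk occ (PySem.List.sorted (PySem.Set.ofList (tiles.map proj)) (fun x => x) false) := by
  have hxs : tiles.map proj ≠ [] := by
    cases tiles with
    | nil => exact absurd rfl hne
    | cons z zs => simp
  have hlp := PySem.List.sorted_ofList_pairwise_lt (tiles.map proj)
  have hlne := pv_sorted_ne_nil _ (pv_ofList_ne_nil _ hxs)
  rw [← pv_head_sorted_set _ hxs, ← pv_last_sorted_set _ hxs, ← pv_core occ _ hlp hlne]
  apply pv_all_congr_mem
  intro c _
  have hiff : (mk c ∈ tiles)
      ↔ (c ∈ PySem.List.sorted (PySem.Set.ofList (tiles.map proj)) (fun x => x) false) := by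
    rw [PySem.List.mem_sorted, PySem.Set.mem_ofList]
    exact hmem c
  rw [decide_eq_decide.mpr hiff]

-- ===== VERDICT (by name: the statement is the Claim_ definition above) =====
theorem are_turn_tiles_connected_py_spec : Claim_equal_are_turn_tiles_connected_py := by
  unfold Claim_equal_are_turn_tiles_connected_py
  intro board tiles _ _
  unfold Spec_are_turn_tiles_connected_py
  rcases tiles with _ | ⟨p, t⟩
  · simp [are_turn_tiles_connected_py, are_turn_tiles_connected_py_alt]
  rcases t with _ | ⟨q, u⟩
  · simp [are_turn_tiles_connected_py, are_turn_tiles_connected_py_alt]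
  unfold are_turn_tiles_connected_py are_turn_tiles_connected_py_alt
  rw [if_neg (show ¬((p :: q :: u).isEmpty = true) by simp)]
  rw [if_neg (show ¬(((p :: q :: u).length == 1) = true) by
        intro hcond; simp only [List.length_cons, beq_iff_eq] at hcond; omega)]
  rw [if_neg (show ¬((p :: q :: u).length ≤ 1) by
        intro hcond; simp only [List.length_cons] at hcond; omega)]
  by_cases hr : (PySem.Set.ofList ((p :: q :: u).map Prod.fst)).length = 1
  · rw [if_pos (show ((PySem.Set.ofList ((p :: q :: u).map Prod.fst)).length == 1) = true from beq_iff_eq.mpr hr)]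
    rw [if_pos (show ((PySem.List.sorted (PySem.Set.ofList ((p :: q :: u).map Prod.fst)) (fun x => x) false).length == 1) = true by
          rw [PySem.List.length_sorted]; exact beq_iff_eq.mpr hr)]
    obtain ⟨e, he⟩ := List.length_eq_one_iff.mp hr
    have hmemE : ∀ x ∈ (p :: q :: u).map Prod.fst, x = e := by
      intro x hx
      have hx' : x ∈ PySem.Set.ofList ((p :: q :: u).map Prod.fst) :=
        (PySem.Set.mem_ofList _ _).mpr hx
      rw [he] at hx'
      simpa using hx'
    have hEp : e = p.1 := (hmemE p.1 (by simp)).symm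
    have r0A : PySem.List.pyGetD ((p :: q :: u).map Prod.fst) 0 0 = p.1 := by
      rw [List.map_cons, PySem.List.pyGetD_zero_cons]
    have r0B : PySem.List.pyGetD (PySem.List.sorted (PySem.Set.ofList ((p :: q :: u).map Prod.fst)) (fun x => x) false) 0 0 = p.1 := by
      rw [he, PySem.List.sorted_eq_self_of_pairwise _ _ (by simp), PySem.List.pyGetD_zero_cons, hEp]
    rw [r0A, r0B]
    have hall : ∀ pt ∈ (p :: q :: u), pt.1 = p.1 := by
      intro pt hpt
      rw [← hEp]
      exact hmemE pt.1 (List.mem_map.mpr ⟨pt, hpt, rfl⟩)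
    exact pv_branch (p :: q :: u) (fun c => (p.1, c)) (fun c => pvCellNotNone board p.1 c)
      Prod.snd (pv_mem_row hall) (by simp)
  · rw [if_neg (show ¬(((PySem.Set.ofList ((p :: q :: u).map Prod.fst)).length == 1) = true) by
          simp only [beq_iff_eq]; exact hr)]
    rw [if_neg (show ¬(((PySem.List.sorted (PySem.Set.ofList ((p :: q :: u).map Prod.fst)) (fun x => x) false).length == 1) = true) by
          simp only [beq_iff_eq, PySem.List.length_sorted]; exact hr)]
    by_cases hc : (PySem.Set.ofList ((p :: q :: u).map Prod.snd)).length = 1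
    · rw [if_pos (show ((PySem.Set.ofList ((p :: q :: u).map Prod.snd)).length == 1) = true from beq_iff_eq.mpr hc)]
      rw [if_pos (show ((PySem.List.sorted (PySem.Set.ofList ((p :: q :: u).map Prod.snd)) (fun x => x) false).length == 1) = true by
            rw [PySem.List.length_sorted]; exact beq_iff_eq.mpr hc)]
      obtain ⟨e, he⟩ := List.length_eq_one_iff.mp hc
      have hmemE : ∀ x ∈ (p :: q :: u).map Prod.snd, x = e := by
        intro x hx
        have hx' : x ∈ PySem.Set.ofList ((p :: q :: u).map Prod.snd) :=
          (PySem.Set.mem_ofList _ _).mpr hx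
        rw [he] at hx'
        simpa using hx'
      have hEp : e = p.2 := (hmemE p.2 (by simp)).symm
      have c0A : PySem.List.pyGetD ((p :: q :: u).map Prod.snd) 0 0 = p.2 := by
        rw [List.map_cons, PySem.List.pyGetD_zero_cons]
      have c0B : PySem.List.pyGetD (PySem.List.sorted (PySem.Set.ofList ((p :: q :: u).map Prod.snd)) (fun x => x) false) 0 0 = p.2 := by
        rw [he, PySem.List.sorted_eq_self_of_pairwise _ _ (by simp), PySem.List.pyGetD_zero_cons, hEp]
      rw [c0A, c0B]
      have hall : ∀ pt ∈ (p :: q :: u), pt.2 = p.2 := by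
        intro pt hpt
        rw [← hEp]
        exact hmemE pt.2 (List.mem_map.mpr ⟨pt, hpt, rfl⟩)
      exact pv_branch (p :: q :: u) (fun r => (r, p.2)) (fun r => pvCellNotNone board r p.2)
        Prod.fst (pv_mem_col hall) (by simp)
    · rw [if_neg (show ¬(((PySem.Set.ofList ((p :: q :: u).map Prod.snd)).length == 1) = true) by
            simp only [beq_iff_eq]; exact hc)]
      rw [if_neg (show ¬(((PySem.List.sorted (PySem.Set.ofList ((p :: q :: u).map Prod.snd)) (fun x => x) false).length == 1) = true) by
            simp only [beq_iff_eq, PySem.List.length_sorted]; exact hc)]
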